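-- pv_equiv track=rewrite | github.com/GeorgeAdrianC/it_school_homeworks | ch_21/capitalize_it.py | capitalize_string
-- ===== SOURCE A (Python) =====
-- def capitalize_string(message: str) -> str:
--     result = message.replace(" i ", " I ")
--
--     if len(message) > 0:
--         result = result[0].upper() + result[1:]
--
--     position = 0
--
--     while position < len(message):
--         if result[position] in [".", "!", "?"]:
--             position = position + 1
--             while position < len(message) and result[position] == " ":
--                 position = position + 1
--             if position < len(message):
--                 result = result[:position] + result[position].upper() + result[position + 1:]
--         position = position + 1
--     return result
-- ===== SOURCE B (Python) =====
-- def capitalize_string(message: str) -> str: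
--     # Single left-to-right pass with a state flag instead of A's index-mutation
--     # scan with repeated string slicing.
--     s = message.replace(" i ", " I ")
--     if s:
--         s = s[0].upper() + s[1:]
--     out = []
--     after_punct = False
--     for ch in s:
--         if after_punct:
--             if ch == " ":
--                 out.append(ch)
--             else:
--                 out.append(ch.upper())
--                 after_punct = False
--         else:
--             out.append(ch)
--             if ch in ".!?":
--                 after_punct = True
--     return "".join(out)
-- ===== Notes on version B (the rewrite author's own statement) =====
-- stated objective: faster
-- what changed: Replaced A's index-mutation while-loop that rebuilds the whole string by slicing at every capitalization with a single left-to-right pass carrying an after-punctuation state flag and an output accumulator.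
import Mathlib
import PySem

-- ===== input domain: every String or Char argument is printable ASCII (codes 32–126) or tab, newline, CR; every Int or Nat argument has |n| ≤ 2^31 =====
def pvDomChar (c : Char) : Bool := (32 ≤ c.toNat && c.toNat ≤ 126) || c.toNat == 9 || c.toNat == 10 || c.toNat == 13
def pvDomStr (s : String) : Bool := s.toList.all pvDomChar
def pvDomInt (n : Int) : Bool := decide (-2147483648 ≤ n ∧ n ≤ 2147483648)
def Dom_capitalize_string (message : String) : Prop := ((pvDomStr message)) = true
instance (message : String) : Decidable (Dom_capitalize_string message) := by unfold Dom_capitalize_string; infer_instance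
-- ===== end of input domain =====

-- B replaces A's index-mutation scan (rebuilding the string by slicing at each
-- capitalization) with one left-to-right pass carrying an after-punctuation flag.

-- ===== PORT A =====

-- inner 'while position < len(message) and result[position] == " "' loop
-- (fuel-bounded transliteration; fuel = n suffices since position only grows)
def pvSkipSp (res : List Char) (pos n fuel : Nat) : Nat :=
  match fuel with
  | 0 => pos
  | f + 1 =>
    if pos < n && (res.getD pos ' ' == ' ') then pvSkipSp res (pos + 1) n f
    else pos

-- outer 'while position < len(message)' loop (fuel-bounded transliteration;
-- position grows by at least 1 per iteration so fuel = n suffices);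
-- result[position] is in range whenever read (|result| = |message|), so getD's
-- default is never used
def pvALoop (res : List Char) (pos n fuel : Nat) : List Char :=
  match fuel with
  | 0 => res
  | f + 1 =>
    if pos < n then
      if ['.', '!', '?'].contains (res.getD pos ' ') then
        let p1 := pvSkipSp res (pos + 1) n n
        let res' :=
          if p1 < n then
            res.take p1 ++ [PySem.Chars.upperChar (res.getD p1 ' ')] ++ res.drop (p1 + 1)
          else res
        pvALoop res' (p1 + 1) n f
      else pvALoop res (pos + 1) n f
    else res

def capitalize_string (message : String) : String :=
  let m := message.toList
  let r0 := PySem.Chars.replace m " i ".toList " I ".toList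
  let r1 := if m.length > 0 then PySem.Chars.upperChar (r0.getD 0 ' ') :: r0.drop 1 else r0
  String.ofList (pvALoop r1 0 m.length m.length)

-- ===== PORT B =====

-- loop body of B's single pass: state = (output so far, after_punct flag)
def pvBStep (acc : List Char × Bool) (ch : Char) : List Char × Bool :=
  if acc.2 then
    if ch == ' ' then (acc.1 ++ [ch], true)
    else (acc.1 ++ [PySem.Chars.upperChar ch], false)
  else (acc.1 ++ [ch], ['.', '!', '?'].contains ch)

def capitalize_string_alt (message : String) : String :=
  let s0 := PySem.Chars.replace message.toList " i ".toList " I ".toList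
  let s := if s0.length > 0 then PySem.Chars.upperChar (s0.getD 0 ' ') :: s0.drop 1 else s0
  String.ofList (s.foldl pvBStep ([], false)).1

-- ===== PRECONDITION & SPEC =====
def Spec_capitalize_string (message : String) (out : String) : Prop := out = capitalize_string_alt message
instance (message : String) (out : String) : Decidable (Spec_capitalize_string message out) := by unfold Spec_capitalize_string; infer_instance

-- ===== CLAIM (what is proved, stated in full; the proofs are below) =====
def Claim_equal_capitalize_string : Prop := ∀ (message : String), Dom_capitalize_string message → Spec_capitalize_string message (capitalize_string message)

-- ===== LEMMAS AND PROOFS =====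

-- B's loop body as a structural recursion on the remaining characters
def pvBGo : List Char → Bool → List Char
  | [], _ => []
  | c :: t, ap =>
    if ap then
      if c == ' ' then c :: pvBGo t true
      else PySem.Chars.upperChar c :: pvBGo t false
    else c :: pvBGo t (['.', '!', '?'].contains c)

lemma pvFoldl_eq_bGo (s : List Char) (acc : List Char) (ap : Bool) :
    (s.foldl pvBStep (acc, ap)).1 = acc ++ pvBGo s ap := by
  induction s generalizing acc ap with
  | nil => simp [pvBGo]
  | cons c t ih =>
    rw [List.foldl_cons]
    by_cases hap : ap = true
    · subst hap
      by_cases hsp : (c == ' ') = true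
      · rw [show pvBStep (acc, true) c = (acc ++ [c], true) by simp [pvBStep, hsp], ih]
        simp [pvBGo, hsp]
      · rw [show pvBStep (acc, true) c = (acc ++ [PySem.Chars.upperChar c], false) by
          simp [pvBStep, hsp], ih]
        simp [pvBGo, hsp]
    · simp only [Bool.not_eq_true] at hap; subst hap
      rw [show pvBStep (acc, false) c = (acc ++ [c], ['.', '!', '?'].contains c) by
        simp [pvBStep], ih]
      simp [pvBGo]

lemma pvSkipSp_spec (res : List Char) :
    ∀ fuel pos, res.length - pos ≤ fuel →
      pos ≤ pvSkipSp res pos res.length fuel ∧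
      pvSkipSp res pos res.length fuel ≤ max pos res.length ∧
      (∀ j, pos ≤ j → j < pvSkipSp res pos res.length fuel → res.getD j ' ' = ' ') ∧
      (pvSkipSp res pos res.length fuel < res.length → res.getD (pvSkipSp res pos res.length fuel) ' ' ≠ ' ') := by
  intro fuel
  induction fuel with
  | zero =>
    intro pos hf
    simp only [pvSkipSp]
    refine ⟨le_rfl, le_max_left _ _, fun j h1 h2 => absurd h2 (by omega), fun h => ?_⟩
    omega
  | succ f ih =>
    intro pos hf
    by_cases h : (pos < res.length && (res.getD pos ' ' == ' ')) = true
    · obtain ⟨h1, h2⟩ : pos < res.length ∧ res.getD pos ' ' = ' ' := by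
        simpa [Bool.and_eq_true] using h
      have hrec := ih (pos + 1) (by omega)
      rw [pvSkipSp, if_pos h]
      refine ⟨by omega, ?_, fun j hj1 hj2 => ?_, hrec.2.2.2⟩
      · have := hrec.2.1; omega
      · rcases Nat.eq_or_lt_of_le hj1 with rfl | hlt
        · exact h2
        · exact hrec.2.2.1 j hlt hj2
    · rw [pvSkipSp, if_neg h]
      refine ⟨le_rfl, le_max_left _ _, fun j h1 h2 => absurd h2 (by omega), fun hlt hsp => ?_⟩
      simp only [Bool.and_eq_true, decide_eq_true_eq, beq_iff_eq, not_and] at h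
      exact h hlt hsp

lemma pvBGo_skip (res : List Char) :
    ∀ fuel pos, pos ≤ res.length → res.length - pos ≤ fuel →
      pvBGo (res.drop pos) true =
        List.replicate (pvSkipSp res pos res.length fuel - pos) ' ' ++
          (if pvSkipSp res pos res.length fuel < res.length then
            PySem.Chars.upperChar (res.getD (pvSkipSp res pos res.length fuel) ' ') ::
              pvBGo (res.drop (pvSkipSp res pos res.length fuel + 1)) false
          else []) := by
  intro fuel
  induction fuel with
  | zero =>
    intro pos hle hf
    have hpos : pos = res.length := by omega
    subst hpos
    simp [pvSkipSp, List.drop_of_length_le, pvBGo]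
  | succ f ih =>
    intro pos hle hf
    by_cases h : (pos < res.length && (res.getD pos ' ' == ' ')) = true
    · obtain ⟨h1, h2⟩ : pos < res.length ∧ res.getD pos ' ' = ' ' := by
        simpa [Bool.and_eq_true] using h
      have hget : res.getD pos ' ' = res[pos] := by
        simp [List.getD, List.getElem?_eq_getElem h1]
      have hdrop : res.drop pos = res[pos] :: res.drop (pos + 1) :=
        List.drop_eq_getElem_cons h1
      have hp1 := (pvSkipSp_spec res f (pos + 1) (by omega)).1
      rw [pvSkipSp, if_pos h]
      rw [hdrop, ← hget, h2]
      have hb : pvBGo (' ' :: res.drop (pos + 1)) true = ' ' :: pvBGo (res.drop (pos + 1)) true := by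
        simp [pvBGo]
      rw [hb, ih (pos + 1) (by omega) (by omega)]
      have : pvSkipSp res (pos + 1) res.length f - pos
          = (pvSkipSp res (pos + 1) res.length f - (pos + 1)) + 1 := by omega
      rw [this, List.replicate_succ]
      simp
    · rw [pvSkipSp, if_neg h]
      simp only [Nat.sub_self, List.replicate_zero, List.nil_append]
      by_cases h1 : pos < res.length
      · have h2 : ¬ res.getD pos ' ' = ' ' := by
          simp only [Bool.and_eq_true, decide_eq_true_eq, beq_iff_eq, not_and] at h
          exact h h1
        have hget : res.getD pos ' ' = res[pos] := by
          simp [List.getD, List.getElem?_eq_getElem h1]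
        have hget : res.getD pos ' ' = res[pos] := by
          simp [List.getD, List.getElem?_eq_getElem h1]
        rw [hget] at h2
        have hb : pvBGo (res[pos] :: res.drop (pos + 1)) true
            = PySem.Chars.upperChar res[pos] :: pvBGo (res.drop (pos + 1)) false := by
          simp [pvBGo, h2]
        rw [List.drop_eq_getElem_cons h1, hb, if_pos h1, ← hget]
      · have hpos : pos = res.length := by omega
        subst hpos
        simp [List.drop_of_length_le, pvBGo]

lemma pvSegment (res : List Char) (pos p1 : Nat) (h1 : pos < p1) (h2 : p1 ≤ res.length)
    (hsp : ∀ j, pos + 1 ≤ j → j < p1 → res.getD j ' ' = ' ') :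
    res.take p1 = res.take pos ++ res[pos]'(by omega) :: List.replicate (p1 - (pos + 1)) ' ' := by
  obtain ⟨k, hk⟩ : ∃ k, p1 = (pos + 1) + k := ⟨p1 - (pos + 1), by omega⟩
  subst hk
  simp only [Nat.add_sub_cancel_left]
  have hpos : pos < res.length := by omega
  have hrep : (res.drop (pos + 1)).take k = List.replicate k ' ' := by
    apply List.eq_replicate_iff.2
    refine ⟨by simp; omega, fun b hb => ?_⟩
    obtain ⟨i, hi, hgb⟩ := List.mem_iff_getElem.1 hb
    have hilen : i < k := by simp at hi; omega
    rw [List.getElem_take, List.getElem_drop] at hgb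
    have hsj := hsp (pos + 1 + i) (by omega) (by omega)
    have hget : res.getD (pos + 1 + i) ' ' = res[pos + 1 + i]'(by omega) := by
      simp [List.getD, List.getElem?_eq_getElem (show pos + 1 + i < res.length by omega)]
    rw [hget] at hsj
    rw [← hgb, ← hsj]
  rw [List.take_add, hrep, List.take_add_one, List.getElem?_eq_getElem hpos,
    Option.toList_some, List.append_assoc, List.singleton_append]

lemma pvMain (n : Nat) :
    ∀ fuel pos (res : List Char), res.length = n → n - pos ≤ fuel →
      pvALoop res pos n fuel = res.take pos ++ pvBGo (res.drop pos) false := by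
  intro fuel
  induction fuel with
  | zero =>
    intro pos res hlen hf
    have : n ≤ pos := by omega
    rw [pvALoop]
    rw [List.take_of_length_le (by omega), List.drop_of_length_le (by omega)]
    simp [pvBGo]
  | succ f ih =>
    intro pos res hlen hf
    by_cases hp : pos < n
    · have hget : res.getD pos ' ' = res[pos]'(by omega) := by
        simp [List.getD, List.getElem?_eq_getElem (show pos < res.length by omega)]
      have hdrop : res.drop pos = res[pos]'(by omega) :: res.drop (pos + 1) :=
        List.drop_eq_getElem_cons (by omega)
      by_cases hc : (['.', '!', '?'].contains (res.getD pos ' ')) = true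
      · -- punctuation at pos
        rw [pvALoop, if_pos hp, if_pos hc]
        simp only []
        have hspec := pvSkipSp_spec res n (pos + 1) (by omega)
        rw [hlen] at hspec
        set p1 := pvSkipSp res (pos + 1) n n with hp1def
        obtain ⟨hge, hmax, hsp, hbound⟩ := hspec
        have hple : p1 ≤ n := by
          have : max (pos + 1) n = n := by omega
          omega
        have hskip := pvBGo_skip res n (pos + 1) (by omega) (by omega)
        rw [hlen] at hskip
        rw [← hp1def] at hskip
        by_cases hP : p1 < n
        · have hulen : (res.take p1).length = p1 := by simp; omega
          have hres' : ∀ u : Char,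
              (res.take p1 ++ [u] ++ res.drop (p1 + 1)).length = n := by
            intro u; simp; omega
          have hlt : p1 < res.length := by omega
          rw [if_pos hP]
          rw [ih (p1 + 1) _ (hres' _) (by omega)]
          have htk : (res.take p1 ++ [PySem.Chars.upperChar (res.getD p1 ' ')] ++ res.drop (p1 + 1)).take (p1 + 1)
              = res.take p1 ++ [PySem.Chars.upperChar (res.getD p1 ' ')] := by
            rw [List.append_assoc]
            rw [show p1 + 1 = (res.take p1).length + 1 by omega]
            rw [List.take_append]
            simp
          have hdr : (res.take p1 ++ [PySem.Chars.upperChar (res.getD p1 ' ')] ++ res.drop (p1 + 1)).drop (p1 + 1)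
              = res.drop (p1 + 1) := by
            rw [show p1 + 1 = (res.take p1 ++ [PySem.Chars.upperChar (res.getD p1 ' ')]).length by simp; omega]
            rw [List.drop_left]
          rw [htk, hdr]
          rw [hdrop]
          have hb : pvBGo (res[pos]'(by omega) :: res.drop (pos + 1)) false
              = res[pos]'(by omega) :: pvBGo (res.drop (pos + 1)) true := by
            rw [pvBGo]
            rw [if_neg (by simp)]
            rw [← hget, hc]
          rw [hb, hskip, if_pos hP]
          rw [pvSegment res pos p1 (by omega) (by omega) hsp]
          simp
        · rw [if_neg hP]
          have hpn : p1 = n := by omega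
          rw [ih (p1 + 1) res hlen (by omega)]
          rw [List.take_of_length_le (by omega), List.drop_of_length_le (by omega)]
          rw [hdrop]
          have hb : pvBGo (res[pos]'(by omega) :: res.drop (pos + 1)) false
              = res[pos]'(by omega) :: pvBGo (res.drop (pos + 1)) true := by
            rw [pvBGo]
            rw [if_neg (by simp)]
            rw [← hget, hc]
          rw [hb, hskip, if_neg hP]
          rw [pvBGo]
          have hseg := pvSegment res pos p1 (by omega) (by omega) hsp
          rw [List.take_of_length_le (by omega)] at hseg
          conv_lhs => rw [hseg]
          simp
      · -- no punctuation at pos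
        rw [pvALoop, if_pos hp, if_neg hc]
        rw [ih (pos + 1) res hlen (by omega)]
        rw [hdrop, pvBGo, if_neg (by simp), ← hget]
        rw [show (['.', '!', '?'].contains (res.getD pos ' ')) = false by simpa using hc]
        rw [List.take_add_one, List.getElem?_eq_getElem (show pos < res.length by omega),
          Option.toList_some, List.append_assoc, List.singleton_append, hget]
    · rw [pvALoop, if_neg hp]
      rw [List.take_of_length_le (by omega), List.drop_of_length_le (by omega)]
      simp [pvBGo]

lemma pvReplaceGoLen (old new : List Char) (h : old.length = new.length) :
    ∀ fuel (l acc : List Char),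
      (PySem.Chars.replace.go old new fuel l acc).length = acc.length + l.length := by
  intro fuel
  induction fuel with
  | zero => intro l acc; simp [PySem.Chars.replace.go]
  | succ f ih =>
    intro l acc
    cases l with
    | nil => simp [PySem.Chars.replace.go]
    | cons c t =>
      rw [PySem.Chars.replace.go]
      by_cases hpre : old.isPrefixOf (c :: t) = true
      · rw [if_pos hpre, ih]
        have hle : old.length ≤ (c :: t).length := (List.isPrefixOf_iff_prefix.1 hpre).length_le
        simp only [List.length_drop, List.length_append, List.length_reverse, List.length_cons] at *
        omega
      · rw [if_neg hpre, ih]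
        simp
        omega

lemma pvReplaceLen (l : List Char) :
    (PySem.Chars.replace l " i ".toList " I ".toList).length = l.length := by
  rw [PySem.Chars.replace, if_neg (by decide)]
  rw [pvReplaceGoLen _ _ (by decide)]
  simp

-- ===== VERDICT (by name: the statement is the Claim_ definition above) =====
theorem capitalize_string_spec : Claim_equal_capitalize_string := by
  intro message _
  unfold Spec_capitalize_string capitalize_string capitalize_string_alt
  simp only []
  set m := message.toList with hm
  set r0 := PySem.Chars.replace m " i ".toList " I ".toList with hr0
  have hlen0 : r0.length = m.length := pvReplaceLen m
  set r1 := if m.length > 0 then PySem.Chars.upperChar (r0.getD 0 ' ') :: r0.drop 1 else r0 with hr1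
  have hlen1 : r1.length = m.length := by
    rw [hr1]
    by_cases h : m.length > 0
    · rw [if_pos h]; simp; omega
    · rw [if_neg h]; exact hlen0
  have hBs : (if r0.length > 0 then PySem.Chars.upperChar (r0.getD 0 ' ') :: r0.drop 1 else r0) = r1 := by
    rw [hr1, hlen0]
  rw [hBs]
  rw [pvMain m.length m.length 0 r1 hlen1 (by omega)]
  rw [pvFoldl_eq_bGo]
  simp
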